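-- pv_equiv track=rewrite | github.com/NongusStudios/boiler_controller_project | Part4/src/plc_modbus_interface.py | bits_to_ints
-- ===== SOURCE A (Python) =====
-- def bits_to_ints(bits: list[bool], bits_per_int: int) -> list[int]:
--     """Convert list of booleans to list of 16-bit integers"""
--     result = []
--     for i in range(0, len(bits), bits_per_int):
--         chunk = bits[i:i + bits_per_int]
--         # Convert chunk to integer
--         value = 0
--         for j, bit in enumerate(chunk):
--             if bit:  # If bit is True/1
--                 value |= (1 << j)  # Set the j-th bit
--         result.append(value)
--     return result
-- ===== SOURCE B (Python) =====
-- def bits_to_ints(bits: list[bool], bits_per_int: int) -> list[int]: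
--     """Convert list of booleans to list of 16-bit integers (single linear pass)."""
--     if bits_per_int <= 0:
--         return []
--     result = []
--     value = 0
--     pos = 0
--     for bit in bits:
--         if bit:
--             value |= (1 << pos)
--         pos += 1
--         if pos == bits_per_int:
--             result.append(value)
--             value = 0
--             pos = 0
--     if pos > 0:
--         result.append(value)
--     return result
-- ===== Notes on version B (the rewrite author's own statement) =====
-- stated objective: alternative
-- what changed: Replaced the nested chunk-slice-then-enumerate loops by a single linear pass keeping a running value and bit position, flushing a word whenever the position reaches bits_per_int.
import Mathlib
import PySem

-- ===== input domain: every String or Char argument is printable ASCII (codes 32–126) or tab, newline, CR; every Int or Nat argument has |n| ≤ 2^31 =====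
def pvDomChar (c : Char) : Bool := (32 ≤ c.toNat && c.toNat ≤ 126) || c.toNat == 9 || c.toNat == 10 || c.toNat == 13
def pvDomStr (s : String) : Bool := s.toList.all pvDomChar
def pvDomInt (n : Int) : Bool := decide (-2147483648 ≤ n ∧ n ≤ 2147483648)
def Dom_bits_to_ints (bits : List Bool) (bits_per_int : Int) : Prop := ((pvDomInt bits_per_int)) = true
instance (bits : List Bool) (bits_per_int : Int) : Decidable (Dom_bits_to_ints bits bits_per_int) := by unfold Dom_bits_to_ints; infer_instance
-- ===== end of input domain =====

-- B replaces A's chunk-slice-then-enumerate nested loops by a single linear pass with a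
-- running value and bit position (alternative decomposition, same asymptotic cost).

-- ===== PORT A =====
def bits_to_ints (bits : List Bool) (bits_per_int : Int) : List Int :=
  (PySem.List.pyRange 0 (bits.length : Int) bits_per_int).foldl
    (fun result i =>
      let chunk := PySem.List.slice bits (some i) (some (i + bits_per_int))
      let value := (PySem.List.enumerate chunk 0).foldl
        (fun value jb => if jb.2 then PySem.Int.bor value ((1:Int) <<< jb.1.toNat) else value) 0
      result ++ [value]) []

-- ===== PORT B =====
def bits_to_ints_alt (bits : List Bool) (bits_per_int : Int) : List Int :=
  if bits_per_int ≤ 0 then []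
  else
    let st := bits.foldl
      (fun (st : List Int × Int × Int) bit =>
        let value := if bit then PySem.Int.bor st.2.1 ((1:Int) <<< st.2.2.toNat) else st.2.1
        let pos := st.2.2 + 1
        if pos = bits_per_int then (st.1 ++ [value], (0:Int), (0:Int))
        else (st.1, value, pos))
      (([] : List Int), (0:Int), (0:Int))
    if st.2.2 > 0 then st.1 ++ [st.2.1] else st.1

-- ===== PRECONDITION & SPEC =====
-- Pre_ excludes only bits_per_int = 0, where Python's range(0, len, 0) raises ValueError.
def Pre_bits_to_ints (bits : List Bool) (bits_per_int : Int) : Prop := bits_per_int ≠ 0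
instance (bits : List Bool) (bits_per_int : Int) : Decidable (Pre_bits_to_ints bits bits_per_int) := by unfold Pre_bits_to_ints; infer_instance
def pvWitness_bits_to_ints : List Bool × Int := ([true, false, true], 2)

def Spec_bits_to_ints (bits : List Bool) (bits_per_int : Int) (out : List Int) : Prop := out = bits_to_ints_alt bits bits_per_int
instance (bits : List Bool) (bits_per_int : Int) (out : List Int) : Decidable (Spec_bits_to_ints bits bits_per_int out) := by unfold Spec_bits_to_ints; infer_instance

-- ===== CLAIM (what is proved, stated in full; the proofs are below) =====
def Claim_equal_bits_to_ints : Prop := ∀ (bits : List Bool) (bits_per_int : Int), Dom_bits_to_ints bits bits_per_int → Pre_bits_to_ints bits bits_per_int → Spec_bits_to_ints bits bits_per_int (bits_to_ints bits bits_per_int)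

-- ===== LEMMAS AND PROOFS =====

/-- Packing a chunk of bits starting at bit position `p` into `v`. -/
def packFrom (v p : Int) : List Bool → Int
  | [] => v
  | b :: r => packFrom (if b then PySem.Int.bor v ((1:Int) <<< p.toNat) else v) (p + 1) r

/-- The common specification: pack chunks of `k+1` bits. -/
def chunkPack (k : Nat) : List Bool → List Int
  | [] => []
  | b :: rest => packFrom 0 0 (b :: rest.take k) :: chunkPack k (rest.drop k)
termination_by l => l.length
decreasing_by simp

lemma chunkPack_nil (k : Nat) : chunkPack k [] = [] := by rw [chunkPack.eq_def]

lemma chunkPack_cons (k : Nat) (b : Bool) (r : List Bool) :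
    chunkPack k (b :: r) = packFrom 0 0 (b :: r.take k) :: chunkPack k (r.drop k) := by
  rw [chunkPack.eq_def]

lemma enum_pack : ∀ (c : List Bool) (v p : Int),
    (PySem.List.enumerate c p).foldl
      (fun value jb => if jb.2 then PySem.Int.bor value ((1:Int) <<< jb.1.toNat) else value) v
      = packFrom v p c := by
  intro c
  induction c with
  | nil => intro v p; rfl
  | cons b r ih =>
      intro v p
      rw [PySem.List.enumerate_cons]
      simp only [List.foldl_cons]
      rw [ih]
      rfl

lemma foldl_append_map {α β : Type} (g : α → β) :
    ∀ (l : List α) (acc : List β),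
      l.foldl (fun r i => r ++ [g i]) acc = acc ++ l.map g := by
  intro l
  induction l with
  | nil => simp
  | cons x xs ih => intro acc; simp [ih]

lemma pv_range_cons {a b s : Int} (hs : 0 < s) (hab : a < b) :
    PySem.List.pyRange a b s = a :: PySem.List.pyRange (a + s) b s := by
  rw [PySem.List.pyRange_of_pos _ _ hs, PySem.List.pyRange_of_pos _ _ hs]
  have hcount : (if a < b then ((b - a + s - 1) / s).toNat else 0)
      = (if a + s < b then ((b - (a + s) + s - 1) / s).toNat else 0) + 1 := by
    rw [if_pos hab]
    by_cases h2 : a + s < b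
    · rw [if_pos h2]
      have hx : b - a + s - 1 = (b - (a + s) + s - 1) + 1 * s := by ring
      rw [hx, Int.add_mul_ediv_right _ _ (by omega : s ≠ 0)]
      have hnn : 0 ≤ (b - (a + s) + s - 1) / s := Int.ediv_nonneg (by omega) (by omega)
      omega
    · rw [if_neg h2]
      have h1 : (b - a + s - 1) / s = 1 := by
        have hx : b - a + s - 1 = (b - a - 1) + 1 * s := by ring
        rw [hx, Int.add_mul_ediv_right _ _ (by omega : s ≠ 0),
            Int.ediv_eq_zero_of_lt (by omega) (by omega)]
        omega
      rw [h1]; omega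
  rw [hcount, List.range_succ_eq_map]
  simp only [List.map_cons, List.map_map]
  refine List.cons_eq_cons.mpr ⟨by simp, ?_⟩
  apply List.map_congr_left
  intro k _
  simp [Function.comp]
  push_cast
  ring

lemma pv_range_shift {s : Int} (hs : 0 < s) (a b c : Int) :
    PySem.List.pyRange (a + c) (b + c) s = (PySem.List.pyRange a b s).map (· + c) := by
  rw [PySem.List.pyRange_of_pos _ _ hs, PySem.List.pyRange_of_pos _ _ hs]
  have h1 : b + c - (a + c) = b - a := by ring
  have h2 : (a + c < b + c) = (a < b) := by
    simp only [eq_iff_iff]; omega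
  simp only [h1, h2, List.map_map]
  apply List.map_congr_left
  intro k _
  simp [Function.comp]
  ring

lemma A_map {s : Int} (hs : 0 < s) :
    ∀ (n : Nat) (bits : List Bool), bits.length ≤ n →
      (PySem.List.pyRange 0 (bits.length : Int) s).map
        (fun i => packFrom 0 0 (PySem.List.slice bits (some i) (some (i + s))))
        = chunkPack (s.toNat - 1) bits := by
  intro n
  induction n with
  | zero =>
      intro bits hlen
      have : bits = [] := by
        cases bits with
        | nil => rfl
        | cons _ _ => simp at hlen
      subst this
      rw [PySem.List.pyRange_of_pos _ _ hs, chunkPack_nil]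
      simp
  | succ m ih =>
      intro bits hlen
      cases bits with
      | nil =>
          rw [PySem.List.pyRange_of_pos _ _ hs, chunkPack_nil]
          simp
      | cons x rest =>
          set K := s.toNat with hKdef
          clear_value K
          have hKs : (K : Int) = s := by rw [hKdef]; exact Int.toNat_of_nonneg (le_of_lt hs)
          have hK1 : 1 ≤ K := by omega
          have hlen' : (0:Int) < ((x :: rest).length : Int) := by
            simp
          rw [pv_range_cons hs hlen']
          simp only [List.map_cons]
          -- head chunk
          have hhead : PySem.List.slice (x :: rest) (some 0) (some (0 + s))
              = x :: rest.take (K - 1) := by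
            rw [zero_add, PySem.List.slice_toNat (x :: rest) le_rfl (le_of_lt hs)]
            simp only [Int.toNat_zero, List.drop_zero, Nat.sub_zero]
            conv_lhs => rw [show s.toNat = (K - 1) + 1 by omega]
            rw [List.take_succ_cons]
          rw [hhead]
          -- tail
          have htail : (PySem.List.pyRange (0 + s) (((x :: rest).length : Int)) s).map
              (fun i => packFrom 0 0 (PySem.List.slice (x :: rest) (some i) (some (i + s))))
              = (PySem.List.pyRange 0 (((rest.drop (K-1)).length : Int)) s).map
                (fun i => packFrom 0 0
                  (PySem.List.slice (rest.drop (K-1)) (some i) (some (i + s)))) := by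
            have hsplit : ((x :: rest).length : Int) = (((x :: rest).length : Int) - s) + s := by
              ring
            rw [hsplit, pv_range_shift hs 0 (((x :: rest).length : Int) - s) s, List.map_map]
            by_cases hbig : ((x :: rest).length : Int) ≤ s
            · -- both ranges empty
              have h1 : PySem.List.pyRange 0 (((x :: rest).length : Int) - s) s = [] := by
                rw [PySem.List.pyRange_of_pos _ _ hs, if_neg (by omega)]
                simp
              have hdropnil : rest.drop (K-1) = [] := by
                apply List.drop_eq_nil_of_le
                have h := hbig
                rw [← hKs] at h
                simp at h
                omega
              have h2 : PySem.List.pyRange 0 (((rest.drop (K-1)).length : Int)) s = [] := by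
                rw [hdropnil]
                rw [PySem.List.pyRange_of_pos _ _ hs]
                simp
              rw [h1, h2]; simp
            · have hlendrop : (((rest.drop (K-1)).length : Int)) = ((x :: rest).length : Int) - s := by
                have h1 : K ≤ rest.length := by
                  rw [← hKs] at hbig
                  simp at hbig
                  omega
                rw [List.length_drop, ← hKs]
                push_cast [Nat.cast_sub (show K - 1 ≤ rest.length by omega)]
                simp
                omega
              rw [hlendrop]
              apply List.map_congr_left
              intro i hi
              have hi0 : 0 ≤ i := by
                rw [PySem.List.mem_pyRange_iff_of_pos hs] at hi
                exact hi.1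
              simp only [Function.comp]
              congr 1
              -- slice (x::rest) (i+s) (i+s+s) = slice (rest.drop (K-1)) i (i+s)
              rw [PySem.List.slice_toNat _ (by omega) (by omega),
                  PySem.List.slice_toNat _ (by omega) (by omega)]
              have e1 : (i + s).toNat = i.toNat + K := by omega
              have e2 : (i + s + s).toNat = i.toNat + K + K := by omega
              rw [e1, e2]
              rw [show i.toNat + K + K - (i.toNat + K) = K from by omega,
                  show i.toNat + K - i.toNat = K from by omega]
              congr 1
              have hx : rest.drop (K - 1) = (x :: rest).drop K := by
                conv_rhs => rw [show K = (K - 1) + 1 from by omega]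
                rw [List.drop_succ_cons]
              rw [hx, List.drop_drop]
              congr 1
              omega
          rw [htail]
          have := ih (rest.drop (K-1)) (by simp at hlen ⊢; omega)
          rw [this]
          rw [chunkPack_cons]

lemma A_eq {bits : List Bool} {s : Int} (hs : 0 < s) :
    bits_to_ints bits s = chunkPack (s.toNat - 1) bits := by
  unfold bits_to_ints
  have hrw : (fun (result : List Int) (i : Int) =>
      result ++ [(PySem.List.enumerate (PySem.List.slice bits (some i) (some (i + s))) 0).foldl
        (fun value jb => if jb.2 then PySem.Int.bor value ((1:Int) <<< jb.1.toNat) else value) 0])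
      = fun result i => result ++ [packFrom 0 0 (PySem.List.slice bits (some i) (some (i + s)))] := by
    funext result i
    rw [enum_pack]
  simp only
  rw [show (fun (result : List Int) (i : Int) =>
      result ++ [(PySem.List.enumerate (PySem.List.slice bits (some i) (some (i + s))) 0).foldl
        (fun value jb => if jb.2 then PySem.Int.bor value ((1:Int) <<< jb.1.toNat) else value) 0]) =
      fun (result : List Int) (i : Int) =>
      result ++ [packFrom 0 0 (PySem.List.slice bits (some i) (some (i + s)))] from hrw]
  rw [foldl_append_map]
  simp only [List.nil_append]
  exact A_map hs bits.length bits le_rfl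

-- B's fold step, named for the lemmas.
def bStep (s : Int) (st : List Int × Int × Int) (bit : Bool) : List Int × Int × Int :=
  let value := if bit then PySem.Int.bor st.2.1 ((1:Int) <<< st.2.2.toNat) else st.2.1
  let pos := st.2.2 + 1
  if pos = s then (st.1 ++ [value], (0:Int), (0:Int)) else (st.1, value, pos)

lemma B_run {s : Int} : ∀ (c : List Bool) (res : List Int) (v p : Int),
    0 ≤ p → p + c.length < s →
    c.foldl (bStep s) (res, v, p) = (res, packFrom v p c, p + c.length) := by
  intro c
  induction c with
  | nil => intro res v p _ _; simp [packFrom]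
  | cons b r ih =>
      intro res v p hp hlt
      simp only [List.foldl_cons]
      rw [show bStep s (res, v, p) b
          = (res, (if b then PySem.Int.bor v ((1:Int) <<< p.toNat) else v), p + 1) from by
        unfold bStep
        simp only
        rw [if_neg (by simp at hlt; omega)]]
      rw [ih _ _ _ (by omega) (by simp at hlt ⊢; omega)]
      rw [packFrom]
      have h3 : p + 1 + (r.length : Int) = p + ((b :: r).length : Int) := by
        simp
        ring
      rw [h3]

lemma B_full {s : Int} : ∀ (c : List Bool) (res : List Int) (v p : Int),
    0 ≤ p → p + c.length = s → c ≠ [] →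
    c.foldl (bStep s) (res, v, p) = (res ++ [packFrom v p c], 0, 0) := by
  intro c
  induction c with
  | nil => intro _ _ _ _ _ hne; exact absurd rfl hne
  | cons b r ih =>
      intro res v p hp heq _
      simp only [List.foldl_cons]
      cases r with
      | nil =>
          rw [show bStep s (res, v, p) b
              = (res ++ [(if b then PySem.Int.bor v ((1:Int) <<< p.toNat) else v)], 0, 0) from by
            unfold bStep
            simp only
            rw [if_pos (by simp at heq; omega)]]
          simp [packFrom]
      | cons b2 r2 =>
          rw [show bStep s (res, v, p) b
              = (res, (if b then PySem.Int.bor v ((1:Int) <<< p.toNat) else v), p + 1) from by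
            unfold bStep
            simp only
            rw [if_neg (by simp at heq; omega)]]
          rw [ih _ _ _ (by omega) (by simp at heq ⊢; omega) (by simp)]
          simp only [packFrom]

lemma B_gen {s : Int} (hs : 0 < s) :
    ∀ (n : Nat) (bits : List Bool) (res : List Int), bits.length ≤ n →
      (let st := bits.foldl (bStep s) (res, (0:Int), (0:Int));
       if st.2.2 > 0 then st.1 ++ [st.2.1] else st.1)
      = res ++ chunkPack (s.toNat - 1) bits := by
  intro n
  induction n with
  | zero =>
      intro bits res hlen
      have : bits = [] := by
        cases bits with
        | nil => rfl
        | cons _ _ => simp at hlen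
      subst this
      simp [chunkPack]
  | succ m ih =>
      intro bits res hlen
      cases bits with
      | nil => simp [chunkPack]
      | cons x rest =>
          set K := s.toNat with hKdef
          clear_value K
          have hKs : (K : Int) = s := by rw [hKdef]; exact Int.toNat_of_nonneg (le_of_lt hs)
          have hK1 : 1 ≤ K := by omega
          by_cases hsmall : ((x :: rest).length : Int) < s
          · -- last partial chunk
            rw [show (x :: rest).foldl (bStep s) (res, (0:Int), (0:Int))
                = (res, packFrom 0 0 (x :: rest), 0 + ((x :: rest).length : Int)) from
              B_run (x :: rest) res 0 0 le_rfl (by simpa using hsmall)]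
            simp only [zero_add]
            rw [if_pos (by simp)]
            have htake : rest.take (K - 1) = rest := by
              apply List.take_of_length_le
              simp at hsmall
              omega
            have hdrop : rest.drop (K - 1) = [] := by
              apply List.drop_eq_nil_of_le
              simp at hsmall
              omega
            rw [chunkPack_cons, htake, hdrop, chunkPack_nil]
          · -- full leading chunk
            have hsplit : x :: rest = (x :: rest.take (K - 1)) ++ rest.drop (K - 1) := by
              have h1 : K - 1 ≤ rest.length := by simp at hsmall; omega
              simp [List.take_append_drop]
            rw [hsplit, List.foldl_append]
            rw [show (x :: rest.take (K - 1)).foldl (bStep s) (res, (0:Int), (0:Int))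
                = (res ++ [packFrom 0 0 (x :: rest.take (K - 1))], 0, 0) from
              B_full _ res 0 0 le_rfl (by
                simp [List.length_take]
                have : K - 1 ≤ rest.length := by simp at hsmall; omega
                omega) (by simp)]
            have hlen2 : (rest.drop (K - 1)).length ≤ m := by
              simp at hlen ⊢; omega
            have := ih (rest.drop (K - 1)) (res ++ [packFrom 0 0 (x :: rest.take (K - 1))]) hlen2
            simp only at this ⊢
            rw [this, ← hsplit, chunkPack_cons]
            simp

lemma B_eq {bits : List Bool} {s : Int} (hs : 0 < s) :
    bits_to_ints_alt bits s = chunkPack (s.toNat - 1) bits := by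
  unfold bits_to_ints_alt
  rw [if_neg (by omega)]
  have := B_gen hs bits.length bits [] le_rfl
  simp only [List.nil_append] at this
  exact this

-- ===== VERDICT (by name: the statement is the Claim_ definition above) =====
theorem bits_to_ints_spec : Claim_equal_bits_to_ints := by
  intro bits s _ hpre
  unfold Spec_bits_to_ints
  rcases lt_trichotomy s 0 with hneg | hzero | hpos
  · -- negative step: both empty
    unfold bits_to_ints bits_to_ints_alt
    rw [if_pos (le_of_lt hneg)]
    unfold PySem.List.pyRange
    rw [if_neg (by omega)]
    rw [if_neg (by omega)]
    rw [if_neg (by omega)]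
    simp
  · exact absurd hzero hpre
  · rw [A_eq hpos, B_eq hpos]
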